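-- pv_equiv track=rewrite | github.com/vint66/Coding-Room | Tasks/Task_6_find_intervals/snozdrin_find_intervals.py | group_nums
-- ===== SOURCE A (Python) =====
-- def group_nums(nums):
--     groups = [[nums[0]]]
--     for i in range(1, len(nums)):
--         for j in groups:
--             if nums[i] - min(j) in {-1, 1} or nums[i] - max(j) in {-1, 1}:
--                 j.append(nums[i])
--                 break
--         else:
--             groups.append([nums[i]])
--     return groups
-- ===== SOURCE B (Python) =====
-- def _link(index, v, i):
--     index.setdefault(v, set()).add(i)
--
--
-- def _unlink(index, v, i):
--     index[v].discard(i)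
--
--
-- def group_nums(nums):
--     # Boundary index: dict mapping each group's current min/max value to the
--     # set of group positions carrying that boundary.  An element x can only
--     # join a group whose min or max is x-1 or x+1, so two dict lookups give
--     # every candidate group; min() of the candidate positions is the group
--     # A's scan would find first.
--     groups = []   # records [mn, mx, members]
--     index = {}    # boundary value -> set of group positions
--     for x in nums:
--         cands = index.get(x - 1, set()) | index.get(x + 1, set())
--         if cands:
--             i = min(cands)
--             mn, mx, members = groups[i]
--             members.append(x)
--             if x < mn or mx < x:
--                 _unlink(index, mn, i)
--                 if mn != mx:
--                     _unlink(index, mx, i)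
--                 if x < mn:
--                     mn = x
--                 else:
--                     mx = x
--                 _link(index, mn, i)
--                 _link(index, mx, i)
--                 groups[i] = [mn, mx, members]
--         else:
--             _link(index, x, len(groups))
--             groups.append([x, x, [x]])
--     return [g[2] for g in groups]
-- ===== Notes on version B (the rewrite author's own statement) =====
-- stated objective: faster
-- what changed: B replaces A's linear scan over all groups (recomputing each group's min/max by rescanning its members) with a dict that indexes every group's two boundary values to the set of group positions carrying them: an element x can only join a group whose min or max is x-1 or x+1, so two dict lookups plus min() over the candidate positions find A's first-matching group, and boundaries are maintained incrementally in O(1) per insertion.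
import Mathlib
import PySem

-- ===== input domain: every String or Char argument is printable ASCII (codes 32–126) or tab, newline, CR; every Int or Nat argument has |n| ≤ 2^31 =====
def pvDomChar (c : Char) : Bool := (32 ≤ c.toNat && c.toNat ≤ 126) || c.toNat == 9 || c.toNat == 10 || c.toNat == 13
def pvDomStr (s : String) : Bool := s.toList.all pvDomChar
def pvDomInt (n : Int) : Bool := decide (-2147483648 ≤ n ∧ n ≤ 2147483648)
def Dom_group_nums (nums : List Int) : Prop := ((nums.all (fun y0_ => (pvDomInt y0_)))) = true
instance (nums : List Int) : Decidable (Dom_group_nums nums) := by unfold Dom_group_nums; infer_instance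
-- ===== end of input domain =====

-- B replaces A's scan over all groups with a dict indexing each group's boundary
-- values (min/max) to the set of group positions carrying them; an element can only
-- join a group whose boundary is x±1, so two lookups find all candidates (faster).

-- ===== PORT A =====
-- 'nums[i] - min(j) in {-1,1} or nums[i] - max(j) in {-1,1}'; groups are nonempty by
-- construction, so the 'none' branch (Python min/max on []) is unreachable.
def aMatch (x : Int) (g : List Int) : Bool :=
  match PySem.List.min? g (fun y => y), PySem.List.max? g (fun y => y) with
  | some mn, some mx => (x - mn == -1 || x - mn == 1) || (x - mx == -1 || x - mx == 1)
  | _, _ => false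

-- the inner 'for j in groups: … break / else: groups.append([x])'
def aStep (gs : List (List Int)) (x : Int) : List (List Int) :=
  match gs with
  | [] => [[x]]
  | g :: rest => if aMatch x g then (g ++ [x]) :: rest else g :: aStep rest x

def group_nums (nums : List Int) : List (List Int) :=
  match PySem.List.pyGet? nums 0 with
  | none => []   -- IndexError in Python; excluded by Pre_group_nums
  | some x0 =>
      (PySem.List.pyRange 1 (PySem.List.len nums) 1).foldl
        (fun gs i => aStep gs (PySem.List.pyGetD nums i 0)) [[x0]]

-- ===== PORT B =====
-- _link(index, v, i): index.setdefault(v, set()).add(i)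
def bLink (idx : PySem.Dict Int (PySem.Set Int)) (v i : Int) : PySem.Dict Int (PySem.Set Int) :=
  idx.insert v (PySem.Set.add (idx.getD v PySem.Set.empty) i)

-- _unlink(index, v, i): index[v].discard(i)  (v is always a present key when called)
def bUnlink (idx : PySem.Dict Int (PySem.Set Int)) (v i : Int) : PySem.Dict Int (PySem.Set Int) :=
  idx.insert v (PySem.Set.discard (idx.getD v PySem.Set.empty) i)

-- the body of B's 'for x in nums' loop; state = (index, groups), a group record is (mn, mx, members)
def bStep (st : PySem.Dict Int (PySem.Set Int) × List (Int × Int × List Int)) (x : Int) :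
    PySem.Dict Int (PySem.Set Int) × List (Int × Int × List Int) :=
  let cands : PySem.Set Int :=
    PySem.Set.union (st.1.getD (x - 1) PySem.Set.empty) (st.1.getD (x + 1) PySem.Set.empty)
  match PySem.List.min? cands (fun y => y) with
  | none => (bLink st.1 x (st.2.length : Int), st.2 ++ [(x, x, [x])])
  | some i =>
      match PySem.List.pyGet? st.2 i with
      | none => st   -- unreachable: candidate positions always index groups
      | some (mn, mx, g) =>
          if x < mn ∨ mx < x then
            let idx1 := bUnlink st.1 mn i
            let idx2 := if mn ≠ mx then bUnlink idx1 mx i else idx1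
            let mn' := if x < mn then x else mn
            let mx' := if x < mn then mx else x
            (bLink (bLink idx2 mn' i) mx' i, st.2.set i.toNat (mn', mx', g ++ [x]))
          else (st.1, st.2.set i.toNat (mn, mx, g ++ [x]))

def group_nums_alt (nums : List Int) : List (List Int) :=
  (nums.foldl bStep (PySem.Dict.empty, [])).2.map (fun r => r.2.2)

-- ===== PRECONDITION & SPEC =====
-- A indexes the first element before looping, so it raises IndexError on the empty list; nothing else raises.
def Pre_group_nums (nums : List Int) : Prop := nums ≠ []
instance (nums : List Int) : Decidable (Pre_group_nums nums) := by unfold Pre_group_nums; infer_instance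
def pvWitness_group_nums : List Int := [1, 2, 5, 3]

def Spec_group_nums (nums : List Int) (out : List (List Int)) : Prop := out = group_nums_alt nums
instance (nums : List Int) (out : List (List Int)) : Decidable (Spec_group_nums nums out) := by unfold Spec_group_nums; infer_instance

-- ===== CLAIM (what is proved, stated in full; the proofs are below) =====
def Claim_equal_group_nums : Prop := ∀ (nums : List Int), Dom_group_nums nums → Pre_group_nums nums → Spec_group_nums nums (group_nums nums)

-- ===== LEMMAS AND PROOFS =====

-- A's membership test, read off a record's cached boundaries
def pMatch (x : Int) (r : Int × Int × List Int) : Bool :=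
  (x - r.1 == -1 || x - r.1 == 1) || (x - r.2.1 == -1 || x - r.2.1 == 1)

-- cached bounds are the true min/max of the members
def Bnd (r : Int × Int × List Int) : Prop :=
  PySem.List.min? r.2.2 (fun y => y) = some r.1 ∧
  PySem.List.max? r.2.2 (fun y => y) = some r.2.1

-- full invariant of B's state: bounds correct, and the index maps a value v to
-- exactly the positions of groups whose min or max is v
def StInv (st : PySem.Dict Int (PySem.Set Int) × List (Int × Int × List Int)) : Prop :=
  (∀ r ∈ st.2, Bnd r) ∧
  ∀ (v i : Int), i ∈ st.1.getD v PySem.Set.empty ↔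
    ∃ (k : Nat) (hk : k < st.2.length), i = (k : Int) ∧ ((st.2[k]).1 = v ∨ (st.2[k]).2.1 = v)

theorem min?_append_one (g : List Int) (mn x : Int)
    (h : PySem.List.min? g (fun y => y) = some mn) :
    PySem.List.min? (g ++ [x]) (fun y => y) = some (min mn x) := by
  match g with
  | [] => simp [PySem.List.min?] at h
  | a :: t =>
    rw [PySem.List.min?_id_cons] at h
    rw [List.cons_append, PySem.List.min?_id_cons, List.foldl_append]
    simp at h ⊢
    omega

theorem max?_append_one (g : List Int) (mx x : Int)
    (h : PySem.List.max? g (fun y => y) = some mx) :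
    PySem.List.max? (g ++ [x]) (fun y => y) = some (max mx x) := by
  match g with
  | [] => simp [PySem.List.max?] at h
  | a :: t =>
    rw [PySem.List.max?_id_cons] at h
    rw [List.cons_append, PySem.List.max?_id_cons, List.foldl_append]
    simp at h ⊢
    omega

theorem bnd_singleton (x : Int) : Bnd (x, x, [x]) := by
  constructor
  · show PySem.List.min? [x] (fun y => y) = some x
    rw [show [x] = x :: ([] : List Int) from rfl, PySem.List.min?_id_cons]; rfl
  · show PySem.List.max? [x] (fun y => y) = some x
    rw [show [x] = x :: ([] : List Int) from rfl, PySem.List.max?_id_cons]; rfl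

theorem aMatch_eq_pMatch (x : Int) (r : Int × Int × List Int) (h : Bnd r) :
    aMatch x r.2.2 = pMatch x r := by
  unfold aMatch pMatch
  rw [h.1, h.2]

theorem mem_bLink (d : PySem.Dict Int (PySem.Set Int)) (v0 i0 v i : Int) :
    i ∈ (bLink d v0 i0).getD v PySem.Set.empty ↔
      i ∈ d.getD v PySem.Set.empty ∨ (v = v0 ∧ i = i0) := by
  unfold bLink
  rw [PySem.Dict.getD_insert]
  by_cases h : v = v0
  · subst h; simp [PySem.Set.mem_add]
  · simp [h]

theorem mem_bUnlink (d : PySem.Dict Int (PySem.Set Int)) (v0 i0 v i : Int) :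
    i ∈ (bUnlink d v0 i0).getD v PySem.Set.empty ↔
      i ∈ d.getD v PySem.Set.empty ∧ ¬(v = v0 ∧ i = i0) := by
  unfold bUnlink
  rw [PySem.Dict.getD_insert]
  by_cases h : v = v0
  · subst h; simp [PySem.Set.mem_discard]
  · simp [h]

-- A's scan when no group matches
theorem aStep_no_match (gs : List (List Int)) (x : Int)
    (h : ∀ g ∈ gs, aMatch x g = false) : aStep gs x = gs ++ [[x]] := by
  induction gs with
  | nil => rfl
  | cons g rest ih =>
      simp only [aStep]
      rw [if_neg (by simp [h g (List.mem_cons_self ..)]), ih (fun g hg => h g (List.mem_cons_of_mem _ hg))]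
      rfl

-- A's scan when the first match is at position k
theorem aStep_match (gs : List (List Int)) (x : Int) (k : Nat) (hk : k < gs.length)
    (hm : aMatch x gs[k] = true) (hmin : ∀ j, j < k → ∀ (hj' : j < gs.length), aMatch x gs[j] = false) :
    aStep gs x = gs.set k (gs[k] ++ [x]) := by
  induction gs generalizing k with
  | nil => simp at hk
  | cons g rest ih =>
      cases k with
      | zero => simp only [aStep]; rw [if_pos (by simpa using hm)]; rfl
      | succ k =>
          have h0 : aMatch x g = false := hmin 0 (Nat.succ_pos k) (by simp)
          simp only [aStep]
          rw [if_neg (by simp [h0])]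
          rw [ih k (by simpa using hk) (by simpa using hm)
            (fun j hj hj' => hmin (j + 1) (by omega) (by simpa using Nat.succ_lt_succ hj'))]
          rfl

-- candidate characterization: under StInv, the two index lookups find exactly the matching groups
theorem mem_cands (st : PySem.Dict Int (PySem.Set Int) × List (Int × Int × List Int))
    (hI : StInv st) (x i : Int) :
    (i ∈ PySem.Set.union (st.1.getD (x - 1) PySem.Set.empty) (st.1.getD (x + 1) PySem.Set.empty)) ↔
      ∃ (k : Nat) (hk : k < st.2.length), i = (k : Int) ∧ pMatch x st.2[k] = true := by
  rw [PySem.Set.mem_union, hI.2 (x - 1) i, hI.2 (x + 1) i]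
  constructor
  · rintro (⟨k, hk, rfl, hb⟩ | ⟨k, hk, rfl, hb⟩) <;>
      exact ⟨k, hk, rfl, by unfold pMatch; rcases hb with hb | hb <;> simp [hb]⟩
  · rintro ⟨k, hk, rfl, hb⟩
    unfold pMatch at hb
    simp only [Bool.or_eq_true, beq_iff_eq] at hb
    rcases hb with (hb | hb) | (hb | hb)
    · exact Or.inr ⟨k, hk, rfl, Or.inl (by omega)⟩
    · exact Or.inl ⟨k, hk, rfl, Or.inl (by omega)⟩
    · exact Or.inr ⟨k, hk, rfl, Or.inr (by omega)⟩
    · exact Or.inl ⟨k, hk, rfl, Or.inr (by omega)⟩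

-- the one-step correspondence: same groups (as member lists), invariant preserved
theorem step_ok (st : PySem.Dict Int (PySem.Set Int) × List (Int × Int × List Int))
    (x : Int) (hI : StInv st) :
    aStep (st.2.map (fun r => r.2.2)) x = ((bStep st x).2).map (fun r => r.2.2) ∧ StInv (bStep st x) := by
  obtain ⟨hB, hidxm⟩ := id hI
  by_cases hEx : ∃ r ∈ st.2, pMatch x r = true
  · -- some group matches; the scan hits position k = findIdx
    set k := List.findIdx (pMatch x) st.2 with hkdef
    have hk : k < st.2.length := List.findIdx_lt_length.2 hEx
    have hpk : pMatch x st.2[k] = true := List.findIdx_getElem (w := hk)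
    have hless : ∀ j (hj : j < st.2.length), j < k → pMatch x st.2[j] = false :=
      fun j hj hlt => List.not_of_lt_findIdx hlt
    have hkmem : (k : Int) ∈ PySem.Set.union (st.1.getD (x - 1) PySem.Set.empty)
        (st.1.getD (x + 1) PySem.Set.empty) := (mem_cands st hI x _).2 ⟨k, hk, rfl, hpk⟩
    obtain ⟨m, hm⟩ : ∃ m, PySem.List.min? (PySem.Set.union (st.1.getD (x - 1) PySem.Set.empty)
        (st.1.getD (x + 1) PySem.Set.empty)) (fun y => y) = some m := by
      cases h : PySem.List.min? (PySem.Set.union (st.1.getD (x - 1) PySem.Set.empty)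
          (st.1.getD (x + 1) PySem.Set.empty)) (fun y => y) with
      | none => rw [PySem.List.min?_eq_none_iff] at h; rw [h] at hkmem; simp at hkmem
      | some m => exact ⟨m, rfl⟩
    obtain ⟨k', hk', rfl, hpk'⟩ := (mem_cands st hI x m).1 (PySem.List.min?_mem hm)
    have hk'k : k' = k := by
      have h2 : (k' : Int) ≤ (k : Int) := PySem.List.min?_isMin hm (k : Int) hkmem
      have h1 : ¬ k' < k := fun hlt => by
        rw [hless k' hk' hlt] at hpk'; exact Bool.false_ne_true hpk'
      omega
    subst hk'k
    obtain ⟨mn, mx, g, hrk⟩ : ∃ mn mx g, st.2[k] = (mn, mx, g) :=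
      ⟨st.2[k].1, st.2[k].2.1, st.2[k].2.2, rfl⟩
    have hget : PySem.List.pyGet? st.2 (k : Int) = some (mn, mx, g) := by
      rw [PySem.List.pyGet?_natCast, List.getElem?_eq_getElem hk', hrk]
    have hbnd : Bnd (mn, mx, g) := hrk ▸ hB st.2[k] (List.getElem_mem hk')
    have hmnmx : mn ≤ mx :=
      PySem.List.min?_isMin hbnd.1 mx (PySem.List.max?_mem hbnd.2)
    have hmapA : aStep (st.2.map (fun r => r.2.2)) x
        = (st.2.map (fun r => r.2.2)).set k (g ++ [x]) := by
      have := aStep_match (st.2.map (fun r => r.2.2)) x k (by simpa using hk')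
        (by rw [List.getElem_map, aMatch_eq_pMatch x _ (hB _ (List.getElem_mem hk')), hpk'])
        (fun j hj hj' => by
          rw [List.getElem_map, aMatch_eq_pMatch x _ (hB _ (List.getElem_mem (by simpa using hj')))]
          exact hless j (by simpa using hj') hj)
      rw [this, List.getElem_map, hrk]
    by_cases hout : x < mn ∨ mx < x
    · -- boundary changes: unlink old boundaries, link new ones
      have hbs : bStep st x =
          (bLink (bLink (if mn ≠ mx then bUnlink (bUnlink st.1 mn (k : Int)) mx (k : Int)
              else bUnlink st.1 mn (k : Int)) (if x < mn then x else mn) (k : Int))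
            (if x < mn then mx else x) (k : Int),
           st.2.set (k : Int).toNat ((if x < mn then x else mn), (if x < mn then mx else x), g ++ [x])) := by
        simp only [bStep]
        rw [hm]; dsimp only; rw [hget]; dsimp only; rw [if_pos hout]
      set mn' := if x < mn then x else mn with hmn'
      set mx' := if x < mn then mx else x with hmx'
      set idx2 := if mn ≠ mx then bUnlink (bUnlink st.1 mn (k : Int)) mx (k : Int)
          else bUnlink st.1 mn (k : Int) with hidx2
      have hmem2 : ∀ v i, i ∈ idx2.getD v PySem.Set.empty ↔
          i ∈ st.1.getD v PySem.Set.empty ∧ ¬(i = (k : Int) ∧ (v = mn ∨ v = mx)) := by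
        intro v i
        rw [hidx2]
        by_cases hd : mn = mx
        · rw [if_neg (by simp [hd]), mem_bUnlink]; subst hd; tauto
        · rw [if_pos hd, mem_bUnlink, mem_bUnlink]; tauto
      refine ⟨?_, ?_, ?_⟩
      · rw [hmapA, hbs]
        simp [List.map_set]
      · -- bounds stay correct
        rw [hbs]
        intro r hr
        rcases List.mem_or_eq_of_mem_set hr with hr' | rfl
        · exact hB r hr'
        · constructor
          · show PySem.List.min? (g ++ [x]) (fun y => y) = some mn'
            rw [min?_append_one g mn x hbnd.1, hmn']
            congr 1; split <;> omega
          · show PySem.List.max? (g ++ [x]) (fun y => y) = some mx'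
            rw [max?_append_one g mx x hbnd.2, hmx']
            congr 1; split <;> omega
      · -- index stays correct
        rw [hbs]
        intro v i
        rw [mem_bLink, mem_bLink, hmem2 v i, hidxm v i]
        simp only [Int.toNat_natCast, List.length_set, List.getElem_set]
        constructor
        · rintro ((⟨⟨j, hj, rfl, hb⟩, hnot⟩ | ⟨rfl, rfl⟩) | ⟨rfl, rfl⟩)
          · have hjk : j ≠ k := by
              rintro rfl
              exact hnot ⟨rfl, by
                rw [hrk] at hb
                rcases hb with hb | hb
                exacts [Or.inl hb.symm, Or.inr hb.symm]⟩
            exact ⟨j, hj, rfl, by rw [if_neg (fun h => hjk h.symm)]; exact hb⟩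
          · exact ⟨k, hk', rfl, by rw [if_pos rfl]; exact Or.inl rfl⟩
          · exact ⟨k, hk', rfl, by rw [if_pos rfl]; exact Or.inr rfl⟩
        · rintro ⟨j, hj, rfl, hb⟩
          by_cases hjk : k = j
          · subst hjk
            rw [if_pos rfl] at hb
            rcases hb with rfl | rfl
            · exact Or.inl (Or.inr ⟨rfl, rfl⟩)
            · exact Or.inr ⟨rfl, rfl⟩
          · rw [if_neg hjk] at hb
            exact Or.inl (Or.inl ⟨⟨j, hj, rfl, hb⟩, by
              rintro ⟨hij, -⟩
              exact hjk (by exact_mod_cast hij.symm)⟩)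
    · -- x lies inside [mn, mx]: bounds and index unchanged
      have hbs : bStep st x = (st.1, st.2.set (k : Int).toNat (mn, mx, g ++ [x])) := by
        simp only [bStep]
        rw [hm]; dsimp only; rw [hget]; dsimp only; rw [if_neg hout]
      refine ⟨?_, ?_, ?_⟩
      · rw [hmapA, hbs]
        simp [List.map_set]
      · rw [hbs]
        intro r hr
        rcases List.mem_or_eq_of_mem_set hr with hr' | rfl
        · exact hB r hr'
        · push Not at hout
          constructor
          · show PySem.List.min? (g ++ [x]) (fun y => y) = some mn
            rw [min?_append_one g mn x hbnd.1]
            congr 1; omega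
          · show PySem.List.max? (g ++ [x]) (fun y => y) = some mx
            rw [max?_append_one g mx x hbnd.2]
            congr 1; omega
      · rw [hbs]
        intro v i
        rw [hidxm v i]
        simp only [Int.toNat_natCast, List.length_set, List.getElem_set]
        constructor
        · rintro ⟨j, hj, rfl, hb⟩
          refine ⟨j, hj, rfl, ?_⟩
          by_cases hjk : k = j
          · subst hjk; rw [if_pos rfl]; rw [hrk] at hb; exact hb
          · rw [if_neg hjk]; exact hb
        · rintro ⟨j, hj, rfl, hb⟩
          refine ⟨j, hj, rfl, ?_⟩
          by_cases hjk : k = j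
          · subst hjk; rw [if_pos rfl] at hb; rw [hrk]; exact hb
          · rw [if_neg hjk] at hb; exact hb
  · -- no group matches: both sides open a fresh group
    push Not at hEx
    have hc : PySem.Set.union (st.1.getD (x - 1) PySem.Set.empty)
        (st.1.getD (x + 1) PySem.Set.empty) = [] := by
      rw [List.eq_nil_iff_forall_not_mem]
      intro i hi
      obtain ⟨j, hj, rfl, hp⟩ := (mem_cands st hI x i).1 hi
      exact hEx st.2[j] (List.getElem_mem hj) hp
    have hbs : bStep st x = (bLink st.1 x (st.2.length : Int), st.2 ++ [(x, x, [x])]) := by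
      simp only [bStep]
      rw [hc]
      rfl
    refine ⟨?_, ?_, ?_⟩
    · rw [hbs]
      rw [aStep_no_match _ x (by
        intro g hg
        obtain ⟨r, hr, rfl⟩ := List.mem_map.1 hg
        rw [aMatch_eq_pMatch x r (hB r hr)]
        simpa using hEx r hr)]
      simp
    · rw [hbs]
      intro r hr
      rcases List.mem_append.1 hr with hr' | hr'
      · exact hB r hr'
      · rw [List.mem_singleton.1 hr']; exact bnd_singleton x
    · rw [hbs]
      intro v i
      rw [mem_bLink, hidxm v i]
      constructor
      · rintro (⟨j, hj, rfl, hb⟩ | ⟨rfl, rfl⟩)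
        · exact ⟨j, by simp only [List.length_append, List.length_cons, List.length_nil]; omega,
            rfl, by rw [List.getElem_append_left hj]; exact hb⟩
        · exact ⟨st.2.length, by simp only [List.length_append, List.length_cons, List.length_nil]; omega,
            rfl, by rw [List.getElem_concat_length rfl]; exact Or.inl rfl⟩
      · rintro ⟨j, hj, rfl, hb⟩
        simp only [List.length_append, List.length_cons, List.length_nil] at hj
        by_cases hjl : j < st.2.length
        · exact Or.inl ⟨j, hjl, rfl, by rw [List.getElem_append_left hjl] at hb; exact hb⟩
        · have : j = st.2.length := by omega
          subst this
          rw [List.getElem_concat_length rfl] at hb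
          refine Or.inr ⟨?_, rfl⟩
          rcases hb with hb | hb <;> exact hb.symm

theorem fold_eq (xs : List Int) (st : PySem.Dict Int (PySem.Set Int) × List (Int × Int × List Int))
    (hI : StInv st) :
    xs.foldl aStep (st.2.map (fun r => r.2.2)) = ((xs.foldl bStep st).2).map (fun r => r.2.2) := by
  induction xs generalizing st with
  | nil => rfl
  | cons x xs ih =>
      simp only [List.foldl_cons]
      obtain ⟨h1, h2⟩ := step_ok st x hI
      rw [h1, ih _ h2]

theorem inv_empty : StInv (PySem.Dict.empty, []) := by
  constructor
  · intro r hr; simp at hr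
  · intro v i
    simp [PySem.Dict.getD_empty, PySem.Set.empty]

-- ===== VERDICT (by name: the statement is the Claim_ definition above) =====
theorem group_nums_spec : Claim_equal_group_nums := by
  intro nums _ hpre
  obtain ⟨x0, tl, rfl⟩ := List.exists_cons_of_ne_nil hpre
  show group_nums (x0 :: tl) = group_nums_alt (x0 :: tl)
  have hg : PySem.List.pyGet? (x0 :: tl) 0 = some x0 := by
    simp [PySem.List.pyGet?, PySem.List.pyIdx?]
  unfold group_nums group_nums_alt
  rw [hg]
  show List.foldl (fun gs i => aStep gs (PySem.List.pyGetD (x0 :: tl) i 0)) [[x0]]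
        (PySem.List.pyRange 1 (PySem.List.len (x0 :: tl))) = _
  rw [PySem.List.foldl_pyRange_pyGetD (x0 :: tl) 0 aStep [[x0]] (by norm_num : (0:Int) ≤ 1)]
  have := fold_eq (x0 :: tl) (PySem.Dict.empty, []) inv_empty
  simp only [List.foldl_cons] at this
  simpa [aStep] using this
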